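-- pv_equiv track=rewrite | github.com/kokatesaurabh/Cyber-Jarvis | D3MON/Run.py | is_website
-- ===== SOURCE A (Python) =====
-- def is_website(target):
--     return any(suffix in target for suffix in [".com", ".net", ".org",".ac", ".ac.uk", ".ad", ".ae", ".aero", ".af", ".ag", ".ai", ".al", ".am", ".an", ".ao", ".aq", ".ar",
--                     ".arpa", ".as", ".asia", ".at", ".au", ".aw", ".ax", ".az", ".ba", ".bb", ".bd", ".be", ".bf", ".bg",
--                     ".bh", ".bi", ".biz", ".bj", ".bm", ".bn", ".bo", ".br", ".bs", ".bt", ".bv", ".bw", ".by", ".bz", ".ca",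
--                     ".cat", ".cc", ".cd", ".cf", ".cg", ".ch", ".ci", ".ck", ".cl", ".cm", ".cn", ".co", ".co.uk", ".com",
--                     ".coop", ".cr", ".cs", ".cu", ".cv", ".cw", ".cx", ".cy", ".cz", ".dd", ".de", ".dj", ".dk", ".dm", ".do",
--                     ".dz", ".ec", ".edu", ".ee", ".eg", ".eh", ".er", ".es", ".et", ".eu", ".fi", ".firm", ".fj", ".fk", ".fm",
--                     ".fo", ".fr", ".fx", ".ga", ".gb", ".gd", ".ge", ".gf", ".gg", ".gh", ".gi", ".gl", ".gm", ".gn", ".gov",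
--                     ".gov.uk", ".gp", ".gq", ".gr", ".gs", ".gt", ".gu", ".gw", ".gy", ".hk", ".hm", ".hn", ".hr", ".ht", ".hu",
--                     ".id", ".ie", ".il", ".im", ".in", ".info", ".int", ".io", ".iq", ".ir", ".is", ".it", ".je", ".jm", ".jo",
--                     ".jobs", ".jp", ".ke", ".kg", ".kh", ".ki", ".km", ".kn", ".kp", ".kr", ".kw", ".ky", ".kz", ".la", ".lb",
--                     ".lc", ".li", ".lk", ".lr", ".ls", ".lt", ".ltd.uk", ".lu", ".lv", ".ly", ".ma", ".mc", ".md", ".me", ".me.uk",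
--                     ".mg", ".mh", ".mil", ".mk", ".ml", ".mm", ".mn", ".mo", ".mobi", ".mod.uk", ".mp", ".mq", ".mr", ".ms", ".mt",
--                     ".mu", ".museum", ".mv", ".mw", ".mx", ".my", ".mz", ".na", ".name", ".nato", ".nc", ".ne", ".net", ".net.uk",
--                     ".nf", ".ng", ".nhs.uk", ".ni", ".nl", ".no", ".nom", ".np", ".nr", ".nt", ".nu", ".nz", ".om", ".org", ".org.uk",
--                     ".pa", ".pe", ".pf", ".pg", ".ph", ".pk", ".pl", ".plc.uk", ".pm", ".pn", ".post", ".pr", ".pro", ".ps", ".pt", ".pw",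
--                     ".py", ".qa", ".re", ".ro", ".rs", ".ru", ".rw", ".sa", ".sb", ".sc", ".sch.uk", ".sd", ".se", ".sg", ".sh", ".si",
--                     ".sj", ".sk", ".sl", ".sm", ".sn", ".so", ".sr", ".ss", ".st", ".store", ".su", ".sv", ".sy", ".sz", ".tc", ".td",
--                     ".tel", ".tf", ".tg", ".th", ".tj", ".tk", ".tl", ".tm", ".tn", ".to", ".tp", ".tr", ".travel", ".tt", ".tv", ".tw",
--                     ".tz", ".ua", ".ug", ".uk", ".um", ".us", ".uy", ".uz", ".va", ".vc", ".ve", ".vg", ".vi", ".vn", ".vu", ".web", ".wf",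
--                     ".ws", ".xxx", ".ye", ".yt", ".yu", ".za", ".zm", ".zr", ".zw"])
-- ===== SOURCE B (Python) =====
-- # Single-pass scan: the 296 distinct patterns reduce to a substring-minimal set
-- # (every other pattern contains one of these), checked at each dot character via hash sets.
-- _TLD2 = frozenset(['ac', 'ad', 'ae', 'af', 'ag', 'ai', 'al', 'am', 'an', 'ao', 'aq', 'ar', 'as', 'at', 'au', 'aw', 'ax', 'az', 'ba', 'bb', 'bd', 'be', 'bf', 'bg', 'bh', 'bi', 'bj', 'bm', 'bn', 'bo', 'br', 'bs', 'bt', 'bv', 'bw', 'by', 'bz', 'ca', 'cc', 'cd', 'cf', 'cg', 'ch', 'ci', 'ck', 'cl', 'cm', 'cn', 'co', 'cr', 'cs', 'cu', 'cv', 'cw', 'cx', 'cy', 'cz', 'dd', 'de', 'dj', 'dk', 'dm', 'do', 'dz', 'ec', 'ee', 'eg', 'eh', 'er', 'es', 'et', 'eu', 'fi', 'fj', 'fk', 'fm', 'fo', 'fr', 'fx', 'ga', 'gb', 'gd', 'ge', 'gf', 'gg', 'gh', 'gi', 'gl', 'gm', 'gn', 'gp', 'gq', 'gr', 'gs', 'gt',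 'gu', 'gw', 'gy', 'hk', 'hm', 'hn', 'hr', 'ht', 'hu', 'id', 'ie', 'il', 'im', 'in', 'io', 'iq', 'ir', 'is', 'it', 'je', 'jm', 'jo', 'jp', 'ke', 'kg', 'kh', 'ki', 'km', 'kn', 'kp', 'kr', 'kw', 'ky', 'kz', 'la', 'lb', 'lc', 'li', 'lk', 'lr', 'ls', 'lt', 'lu', 'lv', 'ly', 'ma', 'mc', 'md', 'me', 'mg', 'mh', 'mk', 'ml', 'mm', 'mn', 'mo', 'mp', 'mq', 'mr', 'ms', 'mt', 'mu', 'mv', 'mw', 'mx', 'my', 'mz', 'na', 'nc', 'ne', 'nf', 'ng', 'ni', 'nl', 'no', 'np', 'nr', 'nt', 'nu', 'nz', 'om', 'pa', 'pe', 'pf', 'pg', 'ph', 'pk', 'pl', 'pm', 'pn', 'pr', 'ps', 'pt', 'pw', 'py', 'qa', 're', 'ro', 'rs', 'ru', 'rw', 'sa', 'sb', 'sc', 'sd', 'se', 'sg', 'sh', 'si', 'sj', 'sk', 'sl', 'sm', 'sn', 'so', 'sr', 'ss', 'st', 'su', 'sv', 'sy', 'sz', 'tc', 'td', 'tf', 'tg',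 'th', 'tj', 'tk', 'tl', 'tm', 'tn', 'to', 'tp', 'tr', 'tt', 'tv', 'tw', 'tz', 'ua', 'ug', 'uk', 'um', 'us', 'uy', 'uz', 'va', 'vc', 've', 'vg', 'vi', 'vn', 'vu', 'wf', 'ws', 'ye', 'yt', 'yu', 'za', 'zm', 'zr', 'zw'])
-- _TLD3 = frozenset(['edu', 'gov', 'mil', 'org', 'tel', 'web', 'xxx'])
--
-- def is_website(target):
--     for i in range(len(target)):
--         if target[i] == '.':
--             if (target[i+1:i+3] in _TLD2 or target[i+1:i+4] in _TLD3
--                     or target[i+1:i+5] == "post"):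
--                 return True
--     return False
-- ===== Notes on version B (the rewrite author's own statement) =====
-- stated objective: faster
-- what changed: Replaces the scan of all 296 patterns over the target by a single pass over the target that, at each dot character, probes a substring-minimal pattern set (257 two-letter + 7 three-letter codes + 'post') in hash sets.
import Mathlib
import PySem

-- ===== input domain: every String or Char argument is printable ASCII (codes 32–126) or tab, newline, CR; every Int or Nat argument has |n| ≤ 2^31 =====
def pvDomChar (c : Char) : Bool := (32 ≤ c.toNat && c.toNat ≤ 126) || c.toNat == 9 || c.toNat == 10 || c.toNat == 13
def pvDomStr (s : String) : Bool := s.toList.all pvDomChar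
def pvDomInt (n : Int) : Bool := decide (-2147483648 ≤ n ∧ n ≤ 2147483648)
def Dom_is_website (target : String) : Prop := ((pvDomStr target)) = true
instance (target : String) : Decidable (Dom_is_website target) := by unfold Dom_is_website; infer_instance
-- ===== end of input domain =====

set_option maxRecDepth 100000
set_option maxHeartbeats 2000000


-- ===== PORT A =====
-- B replaces the 296-pattern substring scan by one pass over the target, checking a
-- substring-minimal pattern set at each dot character (objective: faster, constant-factor).

-- the literal pattern list from the Python source, in order (duplicates kept)
def pvSuffixes : List String := [".com", ".net", ".org", ".ac", ".ac.uk", ".ad", ".ae", ".aero", ".af", ".ag", ".ai", ".al",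
  ".am", ".an", ".ao", ".aq", ".ar", ".arpa", ".as", ".asia", ".at", ".au", ".aw", ".ax",
  ".az", ".ba", ".bb", ".bd", ".be", ".bf", ".bg", ".bh", ".bi", ".biz", ".bj", ".bm",
  ".bn", ".bo", ".br", ".bs", ".bt", ".bv", ".bw", ".by", ".bz", ".ca", ".cat", ".cc",
  ".cd", ".cf", ".cg", ".ch", ".ci", ".ck", ".cl", ".cm", ".cn", ".co", ".co.uk", ".com",
  ".coop", ".cr", ".cs", ".cu", ".cv", ".cw", ".cx", ".cy", ".cz", ".dd", ".de", ".dj",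
  ".dk", ".dm", ".do", ".dz", ".ec", ".edu", ".ee", ".eg", ".eh", ".er", ".es", ".et",
  ".eu", ".fi", ".firm", ".fj", ".fk", ".fm", ".fo", ".fr", ".fx", ".ga", ".gb", ".gd",
  ".ge", ".gf", ".gg", ".gh", ".gi", ".gl", ".gm", ".gn", ".gov", ".gov.uk", ".gp", ".gq",
  ".gr", ".gs", ".gt", ".gu", ".gw", ".gy", ".hk", ".hm", ".hn", ".hr", ".ht", ".hu",
  ".id", ".ie", ".il", ".im", ".in", ".info", ".int", ".io", ".iq", ".ir", ".is", ".it",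
  ".je", ".jm", ".jo", ".jobs", ".jp", ".ke", ".kg", ".kh", ".ki", ".km", ".kn", ".kp",
  ".kr", ".kw", ".ky", ".kz", ".la", ".lb", ".lc", ".li", ".lk", ".lr", ".ls", ".lt",
  ".ltd.uk", ".lu", ".lv", ".ly", ".ma", ".mc", ".md", ".me", ".me.uk", ".mg", ".mh", ".mil",
  ".mk", ".ml", ".mm", ".mn", ".mo", ".mobi", ".mod.uk", ".mp", ".mq", ".mr", ".ms", ".mt",
  ".mu", ".museum", ".mv", ".mw", ".mx", ".my", ".mz", ".na", ".name", ".nato", ".nc", ".ne",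
  ".net", ".net.uk", ".nf", ".ng", ".nhs.uk", ".ni", ".nl", ".no", ".nom", ".np", ".nr", ".nt",
  ".nu", ".nz", ".om", ".org", ".org.uk", ".pa", ".pe", ".pf", ".pg", ".ph", ".pk", ".pl",
  ".plc.uk", ".pm", ".pn", ".post", ".pr", ".pro", ".ps", ".pt", ".pw", ".py", ".qa", ".re",
  ".ro", ".rs", ".ru", ".rw", ".sa", ".sb", ".sc", ".sch.uk", ".sd", ".se", ".sg", ".sh",
  ".si", ".sj", ".sk", ".sl", ".sm", ".sn", ".so", ".sr", ".ss", ".st", ".store", ".su",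
  ".sv", ".sy", ".sz", ".tc", ".td", ".tel", ".tf", ".tg", ".th", ".tj", ".tk", ".tl",
  ".tm", ".tn", ".to", ".tp", ".tr", ".travel", ".tt", ".tv", ".tw", ".tz", ".ua", ".ug",
  ".uk", ".um", ".us", ".uy", ".uz", ".va", ".vc", ".ve", ".vg", ".vi", ".vn", ".vu",
  ".web", ".wf", ".ws", ".xxx", ".ye", ".yt", ".yu", ".za", ".zm", ".zr", ".zw"]

def is_website (target : String) : Bool :=
  -- any(suffix in target for suffix in [...]) — 'in' is PySem.Str.isIn
  pvSuffixes.any (fun suffix => PySem.Str.isIn suffix target)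

-- ===== PORT B =====
-- _TLD2 / _TLD3 of Source B (codes after the dot), as lists of char lists
def pvTLD2 : List (List Char) := [['a', 'c'], ['a', 'd'], ['a', 'e'], ['a', 'f'], ['a', 'g'], ['a', 'i'], ['a', 'l'], ['a', 'm'],
  ['a', 'n'], ['a', 'o'], ['a', 'q'], ['a', 'r'], ['a', 's'], ['a', 't'], ['a', 'u'], ['a', 'w'],
  ['a', 'x'], ['a', 'z'], ['b', 'a'], ['b', 'b'], ['b', 'd'], ['b', 'e'], ['b', 'f'], ['b', 'g'],
  ['b', 'h'], ['b', 'i'], ['b', 'j'], ['b', 'm'], ['b', 'n'], ['b', 'o'], ['b', 'r'], ['b', 's'],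
  ['b', 't'], ['b', 'v'], ['b', 'w'], ['b', 'y'], ['b', 'z'], ['c', 'a'], ['c', 'c'], ['c', 'd'],
  ['c', 'f'], ['c', 'g'], ['c', 'h'], ['c', 'i'], ['c', 'k'], ['c', 'l'], ['c', 'm'], ['c', 'n'],
  ['c', 'o'], ['c', 'r'], ['c', 's'], ['c', 'u'], ['c', 'v'], ['c', 'w'], ['c', 'x'], ['c', 'y'],
  ['c', 'z'], ['d', 'd'], ['d', 'e'], ['d', 'j'], ['d', 'k'], ['d', 'm'], ['d', 'o'], ['d', 'z'],
  ['e', 'c'], ['e', 'e'], ['e', 'g'], ['e', 'h'], ['e', 'r'], ['e', 's'], ['e', 't'], ['e', 'u'],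
  ['f', 'i'], ['f', 'j'], ['f', 'k'], ['f', 'm'], ['f', 'o'], ['f', 'r'], ['f', 'x'], ['g', 'a'],
  ['g', 'b'], ['g', 'd'], ['g', 'e'], ['g', 'f'], ['g', 'g'], ['g', 'h'], ['g', 'i'], ['g', 'l'],
  ['g', 'm'], ['g', 'n'], ['g', 'p'], ['g', 'q'], ['g', 'r'], ['g', 's'], ['g', 't'], ['g', 'u'],
  ['g', 'w'], ['g', 'y'], ['h', 'k'], ['h', 'm'], ['h', 'n'], ['h', 'r'], ['h', 't'], ['h', 'u'],
  ['i', 'd'], ['i', 'e'], ['i', 'l'], ['i', 'm'], ['i', 'n'], ['i', 'o'], ['i', 'q'], ['i', 'r'],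
  ['i', 's'], ['i', 't'], ['j', 'e'], ['j', 'm'], ['j', 'o'], ['j', 'p'], ['k', 'e'], ['k', 'g'],
  ['k', 'h'], ['k', 'i'], ['k', 'm'], ['k', 'n'], ['k', 'p'], ['k', 'r'], ['k', 'w'], ['k', 'y'],
  ['k', 'z'], ['l', 'a'], ['l', 'b'], ['l', 'c'], ['l', 'i'], ['l', 'k'], ['l', 'r'], ['l', 's'],
  ['l', 't'], ['l', 'u'], ['l', 'v'], ['l', 'y'], ['m', 'a'], ['m', 'c'], ['m', 'd'], ['m', 'e'],
  ['m', 'g'], ['m', 'h'], ['m', 'k'], ['m', 'l'], ['m', 'm'], ['m', 'n'], ['m', 'o'], ['m', 'p'],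
  ['m', 'q'], ['m', 'r'], ['m', 's'], ['m', 't'], ['m', 'u'], ['m', 'v'], ['m', 'w'], ['m', 'x'],
  ['m', 'y'], ['m', 'z'], ['n', 'a'], ['n', 'c'], ['n', 'e'], ['n', 'f'], ['n', 'g'], ['n', 'i'],
  ['n', 'l'], ['n', 'o'], ['n', 'p'], ['n', 'r'], ['n', 't'], ['n', 'u'], ['n', 'z'], ['o', 'm'],
  ['p', 'a'], ['p', 'e'], ['p', 'f'], ['p', 'g'], ['p', 'h'], ['p', 'k'], ['p', 'l'], ['p', 'm'],
  ['p', 'n'], ['p', 'r'], ['p', 's'], ['p', 't'], ['p', 'w'], ['p', 'y'], ['q', 'a'], ['r', 'e'],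
  ['r', 'o'], ['r', 's'], ['r', 'u'], ['r', 'w'], ['s', 'a'], ['s', 'b'], ['s', 'c'], ['s', 'd'],
  ['s', 'e'], ['s', 'g'], ['s', 'h'], ['s', 'i'], ['s', 'j'], ['s', 'k'], ['s', 'l'], ['s', 'm'],
  ['s', 'n'], ['s', 'o'], ['s', 'r'], ['s', 's'], ['s', 't'], ['s', 'u'], ['s', 'v'], ['s', 'y'],
  ['s', 'z'], ['t', 'c'], ['t', 'd'], ['t', 'f'], ['t', 'g'], ['t', 'h'], ['t', 'j'], ['t', 'k'],
  ['t', 'l'], ['t', 'm'], ['t', 'n'], ['t', 'o'], ['t', 'p'], ['t', 'r'], ['t', 't'], ['t', 'v'],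
  ['t', 'w'], ['t', 'z'], ['u', 'a'], ['u', 'g'], ['u', 'k'], ['u', 'm'], ['u', 's'], ['u', 'y'],
  ['u', 'z'], ['v', 'a'], ['v', 'c'], ['v', 'e'], ['v', 'g'], ['v', 'i'], ['v', 'n'], ['v', 'u'],
  ['w', 'f'], ['w', 's'], ['y', 'e'], ['y', 't'], ['y', 'u'], ['z', 'a'], ['z', 'm'], ['z', 'r'],
  ['z', 'w']]

def pvTLD3 : List (List Char) := [['e', 'd', 'u'], ['g', 'o', 'v'], ['m', 'i', 'l'], ['o', 'r', 'g'], ['t', 'e', 'l'], ['w', 'e', 'b'], ['x', 'x', 'x']]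

-- the loop of Source B: for each position i with target[i]=='.', test the slices
-- target[i+1:i+3] / target[i+1:i+4] / target[i+1:i+5]; on List Char a slice
-- l[i+1:i+k+1] at the current position is (t.take k) for the tail t — exact.
def pvScan : List Char → Bool
  | [] => false
  | c :: t =>
    if c = '.' ∧ (t.take 2 ∈ pvTLD2 ∨ t.take 3 ∈ pvTLD3 ∨ t.take 4 = ['p','o','s','t'])
    then true
    else pvScan t

def is_website_alt (target : String) : Bool :=
  pvScan target.toList

-- ===== PRECONDITION & SPEC =====
def Spec_is_website (target : String) (out : Bool) : Prop := out = is_website_alt target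
instance (target : String) (out : Bool) : Decidable (Spec_is_website target out) := by unfold Spec_is_website; infer_instance

-- ===== CLAIM (what is proved, stated in full; the proofs are below) =====
def Claim_equal_is_website : Prop := ∀ (target : String), Dom_is_website target → Spec_is_website target (is_website target)

-- ===== LEMMAS AND PROOFS =====

-- the reduced patterns (dot included), the ones pvScan recognises
def pvKept : List (List Char) :=
  pvTLD2.map (fun q => '.' :: q) ++ pvTLD3.map (fun q => '.' :: q) ++ [['.', 'p', 'o', 's', 't']]

set_option maxRecDepth 20000 in
lemma pvTLD2_len : ∀ q ∈ pvTLD2, q.length = 2 := by decide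
lemma pvTLD3_len : ∀ q ∈ pvTLD3, q.length = 3 := by decide

lemma pv_take_mem_iff (t : List Char) (S : List (List Char)) (k : Nat)
    (hlen : ∀ q ∈ S, q.length = k) :
    t.take k ∈ S ↔ ∃ q ∈ S, q <+: t := by
  constructor
  · intro h
    exact ⟨t.take k, h, List.take_prefix k t⟩
  · rintro ⟨q, hq, hpre⟩
    have := (List.prefix_iff_eq_take.mp hpre)
    rw [hlen q hq] at this
    rwa [← this]

lemma pv_take_eq_iff (t : List Char) (q : List Char) :
    t.take q.length = q ↔ q <+: t := by
  constructor
  · intro h; rw [← h]; exact List.take_prefix _ t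
  · intro h; exact (List.prefix_iff_eq_take.mp h).symm

lemma pvScan_iff (l : List Char) : pvScan l = true ↔ ∃ p ∈ pvKept, p <:+: l := by
  induction l with
  | nil =>
    constructor
    · intro h; exact absurd h (by simp [pvScan])
    · rintro ⟨p, hp, hinf⟩
      have : p = [] := List.eq_nil_of_infix_nil hinf
      subst this
      revert hp
      set_option maxRecDepth 20000 in decide
  | cons c t ih =>
    rw [pvScan]
    split
    · rename_i h
      obtain ⟨hc, hcase⟩ := h
      subst hc
      simp only [true_iff]
      rcases hcase with h2 | h3 | h4
      · obtain ⟨q, hq, hpre⟩ := (pv_take_mem_iff t pvTLD2 2 pvTLD2_len).mp h2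
        refine ⟨'.' :: q, ?_, (List.cons_prefix_cons.mpr ⟨rfl, hpre⟩).isInfix⟩
        simp only [pvKept]
        exact List.mem_append_left _
          (List.mem_append_left _ (List.mem_map.mpr ⟨q, hq, rfl⟩))
      · obtain ⟨q, hq, hpre⟩ := (pv_take_mem_iff t pvTLD3 3 pvTLD3_len).mp h3
        refine ⟨'.' :: q, ?_, (List.cons_prefix_cons.mpr ⟨rfl, hpre⟩).isInfix⟩
        simp only [pvKept]
        exact List.mem_append_left _
          (List.mem_append_right _ (List.mem_map.mpr ⟨q, hq, rfl⟩))
      · have hpre : ['p','o','s','t'] <+: t := by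
          have := (pv_take_eq_iff t ['p','o','s','t']).mp (by simpa using h4)
          exact this
        refine ⟨['.', 'p', 'o', 's', 't'], ?_,
          (List.cons_prefix_cons.mpr ⟨rfl, hpre⟩).isInfix⟩
        simp only [pvKept]
        exact List.mem_append_right _ (List.mem_singleton.mpr rfl)
    · rename_i hneg
      rw [ih]
      constructor
      · rintro ⟨p, hp, hinf⟩
        exact ⟨p, hp, hinf.trans (List.suffix_cons c t).isInfix⟩
      · rintro ⟨p, hp, hinf⟩
        rcases (List.infix_cons_iff.mp hinf) with hpre | hinf'
        · -- a kept pattern is a prefix of c :: t: contradicts the failed test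
          exfalso
          apply hneg
          -- every kept pattern is '.' :: q with q in one of the groups
          have hshape : p = '.' :: p.tail ∧
              (p.tail ∈ pvTLD2 ∧ p.tail.length = 2 ∨ p.tail ∈ pvTLD3 ∧ p.tail.length = 3 ∨
               p.tail = ['p','o','s','t']) := by
            simp only [pvKept] at hp
            rcases List.mem_append.mp hp with hAB | hC
            · rcases List.mem_append.mp hAB with hA | hB
              · obtain ⟨q, hq, rfl⟩ := List.mem_map.mp hA
                exact ⟨rfl, Or.inl ⟨hq, pvTLD2_len q hq⟩⟩
              · obtain ⟨q, hq, rfl⟩ := List.mem_map.mp hB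
                exact ⟨rfl, Or.inr (Or.inl ⟨hq, pvTLD3_len q hq⟩)⟩
            · have : p = ['.','p','o','s','t'] := List.mem_singleton.mp hC
              subst this
              exact ⟨rfl, Or.inr (Or.inr rfl)⟩
          obtain ⟨hps, hgrp⟩ := hshape
          rw [hps] at hpre
          obtain ⟨hc, htail⟩ := List.cons_prefix_cons.mp hpre
          refine ⟨hc.symm, ?_⟩
          rcases hgrp with ⟨hq, hl⟩ | ⟨hq, hl⟩ | hq
          · left
            have := (List.prefix_iff_eq_take.mp htail)
            rw [hl] at this; rw [← this]; exact hq
          · right; left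
            have := (List.prefix_iff_eq_take.mp htail)
            rw [hl] at this; rw [← this]; exact hq
          · right; right
            rw [hq] at htail
            have := (List.prefix_iff_eq_take.mp htail)
            simpa using this.symm
        · exact ⟨p, hp, hinf'⟩

-- indices into pvKept: a kept pattern contained in the i-th original pattern
def pvCoverIdx : List Nat := [48, 164, 260, 0, 0, 1, 2, 2, 3, 4, 5, 6, 7, 8, 9, 10, 11, 11, 12, 12, 13, 14, 15, 16, 17, 18, 19, 20, 21, 22, 23, 24, 25, 25, 26, 27, 28, 29, 30, 31, 32, 33, 34, 35, 36, 37, 37, 38, 39, 40, 41, 42, 43, 44, 45, 46, 47, 48, 48, 48, 48, 49, 50, 51, 52, 53, 54, 55, 56, 57, 58, 59, 60, 61, 62, 63, 64, 257, 65, 66, 67, 68, 69, 70, 71, 72, 72, 73, 74, 75, 76, 77, 78, 79, 80, 81, 82, 83, 84, 85, 86, 87, 88, 89, 258, 236, 90, 91, 92, 93, 94, 95, 96, 97, 98, 99, 100, 101, 102, 103, 104, 105, 106, 107, 108, 108, 108, 109, 110, 111, 112, 113, 114, 115, 116, 116, 117, 118, 119, 120, 121, 122, 123, 124, 125, 126,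 127, 128, 129, 130, 131, 132, 133, 134, 135, 136, 136, 137, 138, 139, 140, 141, 142, 143, 143, 144, 145, 259, 146, 147, 148, 149, 150, 150, 150, 151, 152, 153, 154, 155, 156, 156, 157, 158, 159, 160, 161, 162, 162, 162, 163, 164, 164, 164, 165, 166, 236, 167, 168, 169, 169, 170, 171, 172, 173, 174, 175, 260, 236, 176, 177, 178, 179, 180, 181, 182, 182, 183, 184, 264, 185, 185, 186, 187, 188, 189, 190, 191, 192, 193, 194, 195, 196, 197, 198, 198, 199, 200, 201, 202, 203, 204, 205, 206, 207, 208, 209, 210, 211, 212, 212, 213, 214, 215, 216, 217, 218, 261, 219, 220, 221, 222, 223, 224, 225, 226, 227, 228, 229, 229, 230, 231, 232, 233, 234, 235, 236, 237, 238, 239, 240, 241, 242, 243, 244, 245, 246, 247, 262, 248, 249, 263, 250, 251, 252, 253, 254, 255, 256]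

-- indices into pvSuffixes: where the i-th kept pattern itself occurs
def pvSrcIdx : List Nat := [3, 5, 6, 8, 9, 10, 11, 12, 13, 14, 15, 16, 18, 20, 21, 22, 23, 24, 25, 26, 27, 28, 29, 30, 31, 32, 34, 35, 36, 37, 38, 39, 40, 41, 42, 43, 44, 45, 47, 48, 49, 50, 51, 52, 53, 54, 55, 56, 57, 61, 62, 63, 64, 65, 66, 67, 68, 69, 70, 71, 72, 73, 74, 75, 76, 78, 79, 80, 81, 82, 83, 84, 85, 87, 88, 89, 90, 91, 92, 93, 94, 95, 96, 97, 98, 99, 100, 101, 102, 103, 106, 107, 108, 109, 110, 111, 112, 113, 114, 115, 116, 117, 118, 119, 120, 121, 122, 123, 124, 127, 128, 129, 130, 131, 132, 133, 134, 136, 137, 138, 139, 140, 141, 142, 143, 144, 145, 146, 147, 148, 149, 150, 151, 152, 153, 154, 155, 157, 158, 159, 160, 161, 162, 163, 165, 166, 168, 169, 170, 171, 172, 175, 176, 177, 178, 179, 180, 182, 183, 184, 185, 186, 187, 190, 191, 194, 195, 197, 198, 199, 201, 202, 203, 204, 205, 206, 209, 210, 211, 212, 213, 214, 215, 217, 218,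 220, 222, 223, 224, 225, 226, 227, 228, 229, 230, 231, 232, 233, 234, 236, 237, 238, 239, 240, 241, 242, 243, 244, 245, 246, 247, 248, 249, 251, 252, 253, 254, 255, 256, 258, 259, 260, 261, 262, 263, 264, 265, 266, 267, 268, 270, 271, 272, 273, 274, 275, 276, 277, 278, 279, 280, 281, 282, 283, 284, 285, 286, 287, 289, 290, 292, 293, 294, 295, 296, 297, 298, 77, 104, 167, 2, 257, 288, 291, 219]

-- every original pattern contains a kept pattern (witnessed by index, checked by computation)
lemma pv_cover : ∀ p ∈ pvSuffixes, ∃ q ∈ pvKept, q <:+: p.toList := by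
  have h : (pvSuffixes.zip pvCoverIdx).all
      (fun pi => match pvKept[pi.2]? with
        | some q => PySem.Chars.isIn q pi.1.toList
        | none => false) = true := by decide
  have hlen : pvSuffixes.length = (pvSuffixes.zip pvCoverIdx).length := by decide
  have hlen2 : pvSuffixes.length = pvCoverIdx.length := by decide
  intro p hp
  obtain ⟨i, hi, hgot⟩ := List.mem_iff_getElem.mp hp
  have hmem : (pvSuffixes.zip pvCoverIdx)[i]'(by omega) ∈ pvSuffixes.zip pvCoverIdx :=
    List.getElem_mem (by omega)
  have := (List.all_eq_true.mp h) _ hmem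
  rw [List.getElem_zip] at this
  rw [hgot] at this
  simp only at this
  rcases hq : pvKept[pvCoverIdx[i]'(by omega)]? with _ | q
  · rw [hq] at this; exact absurd this (by simp)
  · rw [hq] at this
    exact ⟨q, List.mem_of_getElem? hq, (PySem.Chars.isIn_iff_infix q p.toList).mp this⟩

-- every kept pattern is itself one of the original patterns (witnessed by index)
lemma pv_kept_sub : ∀ q ∈ pvKept, ∃ p ∈ pvSuffixes, p.toList = q := by
  have h : (pvKept.zip pvSrcIdx).all
      (fun qi => match pvSuffixes[qi.2]? with
        | some p => p.toList == qi.1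
        | none => false) = true := by decide
  intro q hq
  obtain ⟨i, hi, hgot⟩ := List.mem_iff_getElem.mp hq
  have hlen : pvKept.length = (pvKept.zip pvSrcIdx).length := by decide
  have hlen2 : pvKept.length = pvSrcIdx.length := by decide
  have hmem : (pvKept.zip pvSrcIdx)[i]'(by omega) ∈ pvKept.zip pvSrcIdx :=
    List.getElem_mem (by omega)
  have := (List.all_eq_true.mp h) _ hmem
  rw [List.getElem_zip] at this
  rw [hgot] at this
  simp only at this
  rcases hp : pvSuffixes[pvSrcIdx[i]'(by omega)]? with _ | p
  · rw [hp] at this; exact absurd this (by simp)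
  · rw [hp] at this
    exact ⟨p, List.mem_of_getElem? hp, by simpa using this⟩

lemma pvA_iff (target : String) :
    is_website target = true ↔ ∃ p ∈ pvSuffixes, p.toList <:+: target.toList := by
  rw [is_website, List.any_eq_true]
  constructor
  · rintro ⟨p, hp, h⟩; exact ⟨p, hp, (PySem.Str.isIn_iff_infix p target).mp h⟩
  · rintro ⟨p, hp, h⟩; exact ⟨p, hp, (PySem.Str.isIn_iff_infix p target).mpr h⟩

lemma pv_main (target : String) : is_website target = is_website_alt target := by
  have hiff : is_website target = true ↔ is_website_alt target = true := by
    rw [pvA_iff, is_website_alt, pvScan_iff]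
    constructor
    · rintro ⟨p, hp, hinf⟩
      obtain ⟨q, hq, hqp⟩ := pv_cover p hp
      exact ⟨q, hq, hqp.trans hinf⟩
    · rintro ⟨q, hq, hinf⟩
      obtain ⟨p, hp, hpq⟩ := pv_kept_sub q hq
      exact ⟨p, hp, hpq ▸ hinf⟩
  cases hA : is_website target
  · cases hB : is_website_alt target
    · rfl
    · exact absurd (hiff.mpr hB) (by rw [hA]; exact Bool.false_ne_true)
  · exact (hiff.mp hA).symm

-- ===== VERDICT (by name: the statement is the Claim_ definition above) =====
theorem is_website_spec : Claim_equal_is_website := by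
  intro target _
  unfold Spec_is_website
  exact pv_main target
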